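-- pv_equiv track=rewrite | github.com/blakeohare/crayon | Interpreter/gen/python-app/Functions.py | v_generateEsfData
-- ===== SOURCE A (Python) =====
-- PST_NoneListOfOne = [None]
--
-- def v_generateEsfData(v_byteCodeLength, v_esfArgs):
--   v_output = (PST_NoneListOfOne * v_byteCodeLength)
--   v_esfTokenStack = []
--   v_esfTokenStackTop = None
--   v_esfArgIterator = 0
--   v_esfArgLength = len(v_esfArgs)
--   v_j = 0
--   v_pc = 0
--   while (v_pc < v_byteCodeLength):
--     if ((v_esfArgIterator < v_esfArgLength) and (v_pc == v_esfArgs[v_esfArgIterator])):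
--       v_esfTokenStackTop = [None, None]
--       v_j = 1
--       while (v_j < 3):
--         v_esfTokenStackTop[(v_j - 1)] = v_esfArgs[(v_esfArgIterator + v_j)]
--         v_j += 1
--       v_esfTokenStack.append(v_esfTokenStackTop)
--       v_esfArgIterator += 3
--     while ((v_esfTokenStackTop != None) and (v_esfTokenStackTop[1] <= v_pc)):
--       v_esfTokenStack.pop()
--       if (len(v_esfTokenStack) == 0):
--         v_esfTokenStackTop = None
--       else:
--         v_esfTokenStackTop = v_esfTokenStack[(len(v_esfTokenStack) - 1)]
--     v_output[v_pc] = v_esfTokenStackTop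
--     v_pc += 1
--   return v_output
-- ===== SOURCE B (Python) =====
-- PST_NoneListOfOne = [None]
--
-- def v_generateEsfData(v_byteCodeLength, v_esfArgs):
--   output = PST_NoneListOfOne * v_byteCodeLength
--   n = len(v_esfArgs)
--   limit = 0
--   i = 0
--   while i + 2 < n:
--     start = v_esfArgs[i]
--     if start < limit or start >= v_byteCodeLength:
--       break
--     token = [v_esfArgs[i + 1], v_esfArgs[i + 2]]
--     for k in range(start, min(token[1], v_byteCodeLength)):
--       output[k] = token
--     limit = start + 1
--     i += 3
--   return output
-- ===== Notes on version B (the rewrite author's own statement) =====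
-- stated objective: simpler
-- what changed: B replaces A's per-position sweep (explicit stack of open tokens, popped at every pc) by a single pass over the esfArgs triples that bulk-fills each accepted token's clipped range [start, min(end, byteCodeLength)) into the output, later triples overwriting earlier ones; no stack and no pc loop.
import Mathlib
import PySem

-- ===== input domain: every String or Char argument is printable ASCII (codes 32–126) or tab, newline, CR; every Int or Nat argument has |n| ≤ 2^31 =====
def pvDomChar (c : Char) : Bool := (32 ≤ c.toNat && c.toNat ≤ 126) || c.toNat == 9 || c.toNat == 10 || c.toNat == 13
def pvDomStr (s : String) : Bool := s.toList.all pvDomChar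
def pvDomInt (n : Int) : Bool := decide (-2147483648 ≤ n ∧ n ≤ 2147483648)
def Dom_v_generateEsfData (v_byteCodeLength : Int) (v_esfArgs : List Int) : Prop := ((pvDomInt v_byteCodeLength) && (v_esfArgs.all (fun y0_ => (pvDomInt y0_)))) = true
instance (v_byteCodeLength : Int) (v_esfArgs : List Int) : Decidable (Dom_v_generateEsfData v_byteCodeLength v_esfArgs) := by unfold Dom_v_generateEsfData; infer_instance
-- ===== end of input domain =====

-- B replaces A's per-position sweep with a stack of open tokens by a single pass over the
-- esfArgs triples that bulk-fills each accepted token's clipped range (simpler: no stack, no pc sweep).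

-- ===== PORT A =====
-- A's inner pop-while loop: pops ended tokens off the stack and recomputes the top.
-- The stack is kept head-first (head = Python's stack[-1]); Python's `stack.pop()` is `tail`.
-- Tokens are always 2-element lists, so `t.getD 1 0` is exactly Python's `t[1]`.
def popLoopA (pc : Int) : List (List Int) → Option (List Int) → List (List Int) × Option (List Int)
  | stack, none => (stack, none)
  | stack, some t =>
    if t.getD 1 0 ≤ pc then
      match stack with
      | [] => ([], none)      -- unreachable: top = some _ only when the stack is nonempty
      | _ :: s =>
        match s with
        | [] => ([], none)    -- top becomes None and the while-condition fails
        | u :: _ => popLoopA pc s (some u)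
    else (stack, some t)

-- A's main while loop; fuel = exact number of remaining iterations (= byteCodeLength - pc),
-- so the `pc < byteCodeLength` guard is the fuel pattern. `args.getD i 0` is exact under
-- Pre_ (which rules out exactly the inputs where Python's `v_esfArgs[...]` raises IndexError).
def aLoopA (args : List Int) : Nat → Int → Nat → List (List Int) → Option (List Int) → List (Option (List Int)) → List (Option (List Int))
  | 0, _, _, _, _, out => out
  | fuel + 1, pc, it, stack, _top, out =>
    if it < args.length ∧ pc = args.getD it 0 then
      -- Python builds [None, None] and overwrites both slots in the j-loop; [0, 0] is the placeholder.
      let tok := (List.range' 1 2).foldl (fun t j => t.set (j - 1) (args.getD (it + j) 0)) [0, 0]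
      let p := popLoopA pc (tok :: stack) (some tok)
      aLoopA args fuel (pc + 1) (it + 3) p.1 p.2 (out.set pc.toNat p.2)
    else
      let p := popLoopA pc stack _top
      aLoopA args fuel (pc + 1) it p.1 p.2 (out.set pc.toNat p.2)

-- `[None] * n` is `[]` for n ≤ 0, matching Int.toNat's clamp.
def v_generateEsfData (v_byteCodeLength : Int) (v_esfArgs : List Int) : List (Option (List Int)) :=
  aLoopA v_esfArgs v_byteCodeLength.toNat 0 0 [] none (List.replicate v_byteCodeLength.toNat none)

-- ===== PORT B =====
-- B's inner for-loop: write the token over output[k] for k in range(s, e).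
def fillTok (out : List (Option (List Int))) (s e : Int) (tok : List Int) : List (Option (List Int)) :=
  (PySem.List.pyRange s e 1).foldl (fun o k => o.set k.toNat (some tok)) out

-- B's while loop over triples; fuel = esfArgs length, an exact upper bound on the
-- iteration count (each iteration advances i by 3 or stops), so the fuel never runs out
-- while the loop condition still holds.
def bLoopB (L : Int) (args : List Int) : Nat → Nat → Int → List (Option (List Int)) → List (Option (List Int))
  | 0, _, _, out => out
  | fuel + 1, i, limit, out =>
    if i + 2 < args.length then
      if args.getD i 0 < limit ∨ L ≤ args.getD i 0 then out
      else
        bLoopB L args fuel (i + 3) (args.getD i 0 + 1)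
          (fillTok out (args.getD i 0) (min (args.getD (i + 2) 0) L) [args.getD (i + 1) 0, args.getD (i + 2) 0])
    else out

def v_generateEsfData_alt (v_byteCodeLength : Int) (v_esfArgs : List Int) : List (Option (List Int)) :=
  bLoopB v_byteCodeLength v_esfArgs v_esfArgs.length 0 0 (List.replicate v_byteCodeLength.toNat none)

-- ===== PRECONDITION & SPEC =====
-- Static raise condition for A: start of triple k (0 in the getD default is never read on the raising path).
def tripStart (args : List Int) (k : Nat) : Int := args.getD (3 * k) 0

-- the first m triples are all accepted by A's sweep: starts strictly increasing, nonnegative, < L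
def chainB (L : Int) (args : List Int) (m : Nat) : Bool :=
  (List.range m).all (fun k =>
    decide (tripStart args k < L) &&
    (if k = 0 then decide (0 ≤ tripStart args 0) else decide (tripStart args (k - 1) < tripStart args k)))

-- A raises IndexError iff esfArgs ends in a partial triple AND the sweep actually reaches it:
-- all full triples accepted and the trailing start itself in acceptance position.
def raiseB (L : Int) (args : List Int) : Bool :=
  decide (args.length % 3 ≠ 0) && chainB L args (args.length / 3) &&
  (if args.length / 3 = 0 then decide (0 ≤ tripStart args 0)
   else decide (tripStart args (args.length / 3 - 1) < tripStart args (args.length / 3))) &&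
  decide (tripStart args (args.length / 3) < L)

-- Pre_ excludes exactly the inputs where A raises IndexError (a reachable trailing partial triple).
def Pre_v_generateEsfData (v_byteCodeLength : Int) (v_esfArgs : List Int) : Prop :=
  raiseB v_byteCodeLength v_esfArgs = false
instance (v_byteCodeLength : Int) (v_esfArgs : List Int) : Decidable (Pre_v_generateEsfData v_byteCodeLength v_esfArgs) := by unfold Pre_v_generateEsfData; infer_instance

def pvWitness_v_generateEsfData : Int × List Int := (3, [0, 9, 2])

def Spec_v_generateEsfData (v_byteCodeLength : Int) (v_esfArgs : List Int) (out : List (Option (List Int))) : Prop := out = v_generateEsfData_alt v_byteCodeLength v_esfArgs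
instance (v_byteCodeLength : Int) (v_esfArgs : List Int) (out : List (Option (List Int))) : Decidable (Spec_v_generateEsfData v_byteCodeLength v_esfArgs out) := by unfold Spec_v_generateEsfData; infer_instance

-- ===== CLAIM (what is proved, stated in full; the proofs are below) =====
def Claim_equal_v_generateEsfData : Prop := ∀ (v_byteCodeLength : Int) (v_esfArgs : List Int), Dom_v_generateEsfData v_byteCodeLength v_esfArgs → Pre_v_generateEsfData v_byteCodeLength v_esfArgs → Spec_v_generateEsfData v_byteCodeLength v_esfArgs (v_generateEsfData v_byteCodeLength v_esfArgs)


-- ===== LEMMAS AND PROOFS =====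

-- proof-only abstraction: the future contribution of A's stack, as B-style bulk fills
-- (bottom token first, top token last, each clipped to [pc, min(end, L)))
def stackFill (L pc : Int) (stack : List (List Int)) (out : List (Option (List Int))) : List (Option (List Int)) :=
  stack.foldr (fun t o => fillTok o pc (min (t.getD 1 0) L) t) out

lemma foldl_set_length (l : List Int) (v : Option (List Int)) :
    ∀ out : List (Option (List Int)), (l.foldl (fun o k => o.set k.toNat v) out).length = out.length := by
  induction l with
  | nil => intro out; rfl
  | cons x xs ih => intro out; simp [List.foldl, ih]

lemma fillTok_length (out : List (Option (List Int))) (s e : Int) (tok : List Int) :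
    (fillTok out s e tok).length = out.length := foldl_set_length _ _ _

lemma fillTok_of_le (out : List (Option (List Int))) (s e : Int) (tok : List Int) (h : e ≤ s) :
    fillTok out s e tok = out := by
  simp [fillTok, PySem.List.pyRange_one_eq_nil h]

lemma fillTok_cons (out : List (Option (List Int))) (s e : Int) (tok : List Int) (h : s < e) :
    fillTok out s e tok = fillTok (out.set s.toNat (some tok)) (s+1) e tok := by
  simp [fillTok, PySem.List.pyRange_one_cons h]

lemma fillTok_getElem? (out : List (Option (List Int))) (s e : Int) (tok : List Int)
    (hs : 0 ≤ s) (k : Nat) :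
    (fillTok out s e tok)[k]? =
      if s ≤ (k : Int) ∧ (k : Int) < e ∧ k < out.length then some (some tok) else out[k]? := by
  induction hn : (e - s).toNat generalizing s out with
  | zero =>
    rw [fillTok_of_le _ _ _ _ (by omega)]
    have : ¬ (s ≤ (k : Int) ∧ (k : Int) < e ∧ k < out.length) := by omega
    simp [this]
  | succ n ih =>
    have hse : s < e := by omega
    rw [fillTok_cons _ _ _ _ hse, ih (s := s+1) (out := out.set s.toNat (some tok)) (by omega) (by omega)]
    simp only [List.length_set]
    by_cases hk : (k : Int) = s
    · have hk' : k = s.toNat := by omega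
      have h1 : ¬ (s + 1 ≤ (k : Int) ∧ (k : Int) < e ∧ k < out.length) := by omega
      rw [if_neg h1]
      by_cases hlen : k < out.length
      · have h2 : s ≤ (k:Int) ∧ (k:Int) < e ∧ k < out.length := by omega
        rw [if_pos h2, hk', List.getElem?_set_self (by omega : s.toNat < out.length)]
      · have h2 : ¬ (s ≤ (k:Int) ∧ (k:Int) < e ∧ k < out.length) := by omega
        rw [if_neg h2, List.getElem?_set]
        rw [if_pos hk'.symm, if_neg (by omega), eq_comm]
        exact List.getElem?_eq_none (by omega)
    · have hkne : s.toNat ≠ k := by omega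
      rw [List.getElem?_set_ne hkne]
      have : (s + 1 ≤ (k:Int) ∧ (k:Int) < e ∧ k < out.length) ↔ (s ≤ (k:Int) ∧ (k:Int) < e ∧ k < out.length) := by omega
      simp only [this]

lemma stackFill_length (L pc : Int) (stack : List (List Int)) (out : List (Option (List Int))) :
    (stackFill L pc stack out).length = out.length := by
  induction stack with
  | nil => rfl
  | cons t rest ih => simp [stackFill, List.foldr] at ih ⊢; rw [fillTok_length, ih]

lemma stackFill_cons (L pc : Int) (t : List Int) (rest : List (List Int)) (out : List (Option (List Int))) :
    stackFill L pc (t :: rest) out = fillTok (stackFill L pc rest out) pc (min (t.getD 1 0) L) t := rfl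

lemma stackFill_getElem?_lt (L pc : Int) (stack : List (List Int)) (out : List (Option (List Int)))
    (hpc : 0 ≤ pc) (k : Nat) (hk : (k : Int) < pc) :
    (stackFill L pc stack out)[k]? = out[k]? := by
  induction stack with
  | nil => rfl
  | cons t rest ih =>
    rw [stackFill_cons, fillTok_getElem? _ _ _ _ hpc, if_neg (by omega), ih]

lemma stackFill_of_ge (L pc : Int) (stack : List (List Int)) (out : List (Option (List Int)))
    (h : L ≤ pc) : stackFill L pc stack out = out := by
  induction stack with
  | nil => rfl
  | cons t rest ih =>
    rw [stackFill_cons, fillTok_of_le _ _ _ _ (by omega : min (t.getD 1 0) L ≤ pc), ih]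

lemma stackFill_set_comm (L pc : Int) (stack : List (List Int)) (out : List (Option (List Int)))
    (v : Option (List Int)) (hpc : 0 ≤ pc) (k : Nat) (hk : (k : Int) ≠ pc) :
    (stackFill L pc stack out)[k]? = (stackFill L (pc + 1) stack (out.set pc.toNat v))[k]? := by
  induction stack with
  | nil =>
    exact (List.getElem?_set_ne (by omega : pc.toNat ≠ k)).symm
  | cons t rest ih =>
    rw [stackFill_cons, stackFill_cons, fillTok_getElem? _ _ _ _ hpc,
        fillTok_getElem? _ _ _ _ (by omega : (0:Int) ≤ pc + 1)]
    rw [stackFill_length, stackFill_length, List.length_set]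
    have hiff : (pc ≤ (k:Int) ∧ (k:Int) < min (t.getD 1 0) L ∧ k < out.length) ↔
        (pc + 1 ≤ (k:Int) ∧ (k:Int) < min (t.getD 1 0) L ∧ k < out.length) := by omega
    simp only [hiff]
    split
    · rfl
    · exact ih

lemma step_eq (L pc : Int) (stack : List (List Int)) (out : List (Option (List Int)))
    (hpc : 0 ≤ pc) (hpcL : pc < L) (hlen : out.length = L.toNat)
    (hnone : out[pc.toNat]? = some none) :
    stackFill L pc stack out =
      stackFill L (pc + 1) (stack.dropWhile (fun t => decide (t.getD 1 0 ≤ pc)))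
        (out.set pc.toNat (stack.dropWhile (fun t => decide (t.getD 1 0 ≤ pc))).head?) := by
  induction stack with
  | nil =>
    show out = out.set pc.toNat none
    apply List.ext_getElem?
    intro i
    by_cases hi : i = pc.toNat
    · subst hi; rw [List.getElem?_set_self (by omega), hnone]
    · rw [List.getElem?_set_ne (fun h => hi h.symm)]
  | cons t rest ih =>
    by_cases hcond : t.getD 1 0 ≤ pc
    · have hd : List.dropWhile (fun t => decide (t.getD 1 0 ≤ pc)) (t :: rest)
          = List.dropWhile (fun t => decide (t.getD 1 0 ≤ pc)) rest := by
        rw [List.dropWhile_cons, if_pos (by simpa using hcond)]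
      rw [stackFill_cons, fillTok_of_le _ _ _ _ (by omega : min (t.getD 1 0) L ≤ pc), hd, ← ih]
    · have hd : List.dropWhile (fun t => decide (t.getD 1 0 ≤ pc)) (t :: rest) = t :: rest := by
        rw [List.dropWhile_cons, if_neg (by simpa using hcond)]
      rw [hd]
      show fillTok (stackFill L pc rest out) pc (min (t.getD 1 0) L) t
          = fillTok (stackFill L (pc + 1) rest (out.set pc.toNat (some t))) (pc + 1) (min (t.getD 1 0) L) t
      apply List.ext_getElem?
      intro k
      rw [fillTok_getElem? _ _ _ _ hpc, fillTok_getElem? _ _ _ _ (by omega : (0:Int) ≤ pc + 1),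
          stackFill_length, stackFill_length, List.length_set]
      by_cases hk : (k : Int) = pc
      · have hk' : k = pc.toNat := by omega
        rw [if_pos (by omega : pc ≤ (k:Int) ∧ (k:Int) < min (t.getD 1 0) L ∧ k < out.length),
            if_neg (by omega : ¬ (pc + 1 ≤ (k:Int) ∧ (k:Int) < min (t.getD 1 0) L ∧ k < out.length)),
            stackFill_getElem?_lt _ _ _ _ (by omega) _ (by omega), hk',
            List.getElem?_set_self (by omega)]
      · have hiff : (pc ≤ (k:Int) ∧ (k:Int) < min (t.getD 1 0) L ∧ k < out.length) ↔
            (pc + 1 ≤ (k:Int) ∧ (k:Int) < min (t.getD 1 0) L ∧ k < out.length) := by omega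
        simp only [hiff]
        split
        · rfl
        · exact stackFill_set_comm L pc rest out (some t) hpc k hk

lemma popLoopA_eq (pc : Int) (stack : List (List Int)) :
    popLoopA pc stack stack.head? =
      (stack.dropWhile (fun t => decide (t.getD 1 0 ≤ pc)),
       (stack.dropWhile (fun t => decide (t.getD 1 0 ≤ pc))).head?) := by
  induction stack with
  | nil => simp [popLoopA]
  | cons t rest ih =>
    show popLoopA pc (t :: rest) (some t) = _
    simp only [popLoopA]
    by_cases hcond : t.getD 1 0 ≤ pc
    · rw [if_pos hcond, List.dropWhile_cons, if_pos (by simpa using hcond)]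
      cases rest with
      | nil => rfl
      | cons u rs => exact ih
    · rw [if_neg hcond, List.dropWhile_cons, if_neg (by simpa using hcond)]
      rfl

lemma chainB_succ (L : Int) (args : List Int) (m : Nat) :
    chainB L args (m + 1) =
      (chainB L args m &&
       (decide (tripStart args m < L) &&
        (if m = 0 then decide (0 ≤ tripStart args 0)
         else decide (tripStart args (m - 1) < tripStart args m)))) := by
  simp [chainB, List.range_succ]

lemma bLoopB_stop (L : Int) (args : List Int) (fuel i : Nat) (limit : Int)
    (out : List (Option (List Int))) (h : L ≤ limit) : bLoopB L args fuel i limit out = out := by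
  cases fuel with
  | zero => rfl
  | succ f =>
    simp only [bLoopB]
    split
    · split
      · rfl
      · rename_i hc
        exfalso
        omega
    · rfl

lemma bLoopB_fuel (L : Int) (args : List Int) :
    ∀ (F1 F2 i : Nat) (limit : Int) (out : List (Option (List Int))),
      args.length - i ≤ F1 → args.length - i ≤ F2 →
      bLoopB L args F1 i limit out = bLoopB L args F2 i limit out := by
  have succ_eq : ∀ (F i : Nat) (limit : Int) (out : List (Option (List Int))),
      args.length - i ≤ F → bLoopB L args (F + 1) i limit out = bLoopB L args F i limit out := by
    intro F
    induction F with
    | zero =>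
      intro i limit out h
      have hni : ¬ (i + 2 < args.length) := by omega
      simp [bLoopB, hni]
    | succ F ihF =>
      intro i limit out h
      simp only [bLoopB]
      split
      · split
        · rfl
        · exact ihF (i + 3) _ _ (by omega)
      · rfl
  have aux : ∀ (d F i : Nat) (limit : Int) (out : List (Option (List Int))),
      F = (args.length - i) + d →
      bLoopB L args F i limit out = bLoopB L args (args.length - i) i limit out := by
    intro d
    induction d with
    | zero => intro F i limit out hF; rw [hF, Nat.add_zero]
    | succ d ihd =>
      intro F i limit out hF
      have h1 : F = ((args.length - i) + d) + 1 := by omega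
      rw [h1, succ_eq _ _ _ _ (by omega), ihd _ _ _ _ rfl]
  intro F1 F2 i limit out h1 h2
  rw [aux (F1 - (args.length - i)) F1 i limit out (by omega),
      aux (F2 - (args.length - i)) F2 i limit out (by omega)]

lemma bLoopB_bump (L : Int) (args : List Int) (fuel i : Nat) (pc : Int)
    (out : List (Option (List Int)))
    (hne : args.length ≤ i + 2 ∨ args.getD i 0 ≠ pc) :
    bLoopB L args fuel i pc out = bLoopB L args fuel i (pc + 1) out := by
  cases fuel with
  | zero => rfl
  | succ f =>
    simp only [bLoopB]
    by_cases h2 : i + 2 < args.length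
    · have hsne : args.getD i 0 ≠ pc := by
        rcases hne with h | h
        · omega
        · exact h
      rw [if_pos h2, if_pos h2]
      by_cases hc : args.getD i 0 < pc ∨ L ≤ args.getD i 0
      · rw [if_pos hc, if_pos (by omega)]
      · rw [if_neg hc, if_neg (by omega)]
    · rw [if_neg h2, if_neg h2]

-- under Pre_, an accepted triple is never the trailing partial one
lemma accept_full (L : Int) (args : List Int) (hpre : raiseB L args = false)
    (it : Nat) (pc : Int) (h3 : it % 3 = 0) (hit : it < args.length)
    (hchain : chainB L args (it / 3) = true)
    (hprev : 0 < it → args.getD (it - 3) 0 < pc)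
    (hacc : pc = args.getD it 0) (hpc : 0 ≤ pc) (hpcL : pc < L) :
    it + 2 < args.length := by
  by_contra hpart
  have hn3 : args.length % 3 ≠ 0 := by omega
  have hdiv : args.length / 3 = it / 3 := by omega
  have h3m : 3 * (it / 3) = it := by omega
  have htrue : raiseB L args = true := by
    unfold raiseB
    rw [hdiv]
    simp only [Bool.and_eq_true, decide_eq_true_eq]
    refine ⟨⟨⟨by simpa using hn3, hchain⟩, ?_⟩, ?_⟩
    · by_cases h0 : it / 3 = 0
      · have hit0 : it = 0 := by omega
        subst hit0
        rw [if_pos h0]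
        simp only [tripStart, decide_eq_true_eq, Nat.mul_zero]
        rw [← hacc]
        exact hpc
      · rw [if_neg h0]
        simp only [tripStart, decide_eq_true_eq]
        have e1 : 3 * (it / 3 - 1) = it - 3 := by omega
        rw [e1, h3m, ← hacc]
        exact hprev (by omega)
    · simp only [tripStart, decide_eq_true_eq]
      rw [h3m, ← hacc]
      exact hpcL
  rw [htrue] at hpre
  exact Bool.noConfusion hpre

lemma inv_main (L : Int) (args : List Int) (hpre : raiseB L args = false) :
    ∀ (fuel : Nat) (pc : Int) (it : Nat) (stack : List (List Int)) (out : List (Option (List Int))),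
      pc + fuel = L → 0 ≤ pc →
      out.length = L.toNat →
      (∀ k : Nat, pc ≤ (k : Int) → k < out.length → out[k]? = some none) →
      it % 3 = 0 →
      chainB L args (it / 3) = true →
      (0 < it → args.getD (it - 3) 0 < pc) →
      aLoopA args fuel pc it stack stack.head? out = bLoopB L args args.length it pc (stackFill L pc stack out) := by
  intro fuel
  induction fuel with
  | zero =>
    intro pc it stack out h1 h2 h3 h4 h5 h6 h7
    show out = _
    rw [stackFill_of_ge _ _ _ _ (by omega), bLoopB_stop _ _ _ _ _ _ (by omega)]
  | succ f ih =>
    intro pc it stack out h1 h2 h3 h4 h5 h6 h7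
    have hpcL : pc < L := by omega
    have hnone : out[pc.toNat]? = some none := h4 pc.toNat (by omega) (by omega)
    by_cases hacc : it < args.length ∧ pc = args.getD it 0
    · -- A accepts the triple at it (pc = its start)
      have hfull : it + 2 < args.length :=
        accept_full L args hpre it pc h5 hacc.1 h6 h7 hacc.2 h2 hpcL
      simp only [aLoopA]
      rw [if_pos hacc]
      have htok : (List.range' 1 2).foldl (fun t j => t.set (j - 1) (args.getD (it + j) 0)) [0, 0]
          = [args.getD (it + 1) 0, args.getD (it + 2) 0] := rfl
      rw [htok]
      have hpop := popLoopA_eq pc ([args.getD (it + 1) 0, args.getD (it + 2) 0] :: stack)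
      rw [show ([args.getD (it + 1) 0, args.getD (it + 2) 0] :: stack).head?
            = some [args.getD (it + 1) 0, args.getD (it + 2) 0] from rfl] at hpop
      rw [hpop]
      have hstep := step_eq L pc ([args.getD (it + 1) 0, args.getD (it + 2) 0] :: stack) out
        h2 hpcL h3 hnone
      have hih := ih (pc + 1) (it + 3)
        (([args.getD (it + 1) 0, args.getD (it + 2) 0] :: stack).dropWhile
          (fun t => decide (t.getD 1 0 ≤ pc)))
        (out.set pc.toNat
          ((([args.getD (it + 1) 0, args.getD (it + 2) 0] :: stack).dropWhile
            (fun t => decide (t.getD 1 0 ≤ pc))).head?))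
        (by omega) (by omega) (by rw [List.length_set]; exact h3)
        (by
          intro k hk hklen
          rw [List.length_set] at hklen
          rw [List.getElem?_set_ne (by omega : pc.toNat ≠ k)]
          exact h4 k (by omega) hklen)
        (by omega)
        (by
          have hdiv : (it + 3) / 3 = it / 3 + 1 := by omega
          rw [hdiv, chainB_succ, h6, Bool.true_and, Bool.and_eq_true]
          constructor
          · simp only [tripStart, decide_eq_true_eq]
            rw [show 3 * (it / 3) = it from by omega, ← hacc.2]
            exact hpcL
          · by_cases h0 : it / 3 = 0
            · rw [if_pos h0]
              simp only [tripStart, decide_eq_true_eq]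
              rw [show (3 * 0 : Nat) = it from by omega, ← hacc.2]
              exact h2
            · rw [if_neg h0]
              simp only [tripStart, decide_eq_true_eq]
              rw [show 3 * (it / 3 - 1) = it - 3 from by omega,
                  show 3 * (it / 3) = it from by omega, ← hacc.2]
              exact h7 (by omega))
        (by
          intro _
          rw [show it + 3 - 3 = it from by omega, ← hacc.2]
          omega)
      rw [hih]
      -- now the B side: unfold one bLoopB step
      obtain ⟨F, hF⟩ : ∃ F, args.length = F + 1 := ⟨args.length - 1, by omega⟩
      rw [show bLoopB L args args.length it pc (stackFill L pc stack out)
            = bLoopB L args (F + 1) it pc (stackFill L pc stack out) from by rw [← hF]]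
      simp only [bLoopB]
      rw [if_pos (by omega : it + 2 < args.length),
          if_neg (by rw [← hacc.2]; omega :
            ¬ (args.getD it 0 < pc ∨ L ≤ args.getD it 0))]
      rw [← hacc.2]
      have hsf : fillTok (stackFill L pc stack out) pc
            (min (args.getD (it + 2) 0) L) [args.getD (it + 1) 0, args.getD (it + 2) 0]
          = stackFill L pc ([args.getD (it + 1) 0, args.getD (it + 2) 0] :: stack) out := rfl
      rw [hsf, hstep]
      exact (bLoopB_fuel L args F args.length (it + 3) _ _ (by omega) (by omega)).symm
    · -- A does not accept at this pc
      simp only [aLoopA]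
      rw [if_neg hacc, popLoopA_eq pc stack]
      have hstep := step_eq L pc stack out h2 hpcL h3 hnone
      have hih := ih (pc + 1) it
        (stack.dropWhile (fun t => decide (t.getD 1 0 ≤ pc)))
        (out.set pc.toNat ((stack.dropWhile (fun t => decide (t.getD 1 0 ≤ pc))).head?))
        (by omega) (by omega) (by rw [List.length_set]; exact h3)
        (by
          intro k hk hklen
          rw [List.length_set] at hklen
          rw [List.getElem?_set_ne (by omega : pc.toNat ≠ k)]
          exact h4 k (by omega) hklen)
        h5 h6
        (by intro h; exact lt_trans (h7 h) (by omega))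
      rw [hih, ← hstep]
      have hne : args.length ≤ it + 2 ∨ args.getD it 0 ≠ pc := by
        by_cases hin : it < args.length
        · right
          intro he
          exact hacc ⟨hin, he.symm⟩
        · left
          omega
      exact (bLoopB_bump L args args.length it pc _ hne).symm

-- ===== VERDICT (by name: the statement is the Claim_ definition above) =====
theorem v_generateEsfData_spec : Claim_equal_v_generateEsfData := by
  intro L args _hdom hpre
  unfold Spec_v_generateEsfData v_generateEsfData v_generateEsfData_alt
  by_cases hL : 0 < L
  · have h := inv_main L args hpre L.toNat 0 0 [] (List.replicate L.toNat none)
      (by omega) le_rfl (by simp)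
      (by
        intro k _ hklen
        simp only [List.length_replicate] at hklen
        simp [hklen])
      rfl (by simp [chainB]) (fun h => absurd h (by omega))
    exact h
  · have hL0 : L.toNat = 0 := by omega
    rw [hL0]
    show ([] : List (Option (List Int))) = bLoopB L args args.length 0 0 []
    rw [bLoopB_stop L args args.length 0 0 [] (by omega)]
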